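-- pv_equiv track=rewrite | github.com/smrodriguezv/Reto-Mutante | esMutante/metodoSecuencia.py | ejeOblicuoDe
-- ===== SOURCE A (Python) =====
-- LONG_SEC=4      #Represente la longitud de la secuencia, en este caso es 4 porque cada secuencia debe ser de 4 caracteres.
--
-- def ejeOblicuoDe(dna):
--     strOblicuoDe = ""
--     lenDna=(len(dna)-1)
--     for j in range((LONG_SEC-1),len(dna)):
--         strOblicuoDeA=""
--         strOblicuoDeB=""
--         for i in range (j+1):
--             strOblicuoDeA += dna[i][(j-i)]
--             if j!=(lenDna):
--                 strOblicuoDeB += dna[lenDna-(j-i)][lenDna-i]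
--         strOblicuoDe += (strOblicuoDeA +"," + strOblicuoDeB + ",")
--     return strOblicuoDe
-- ===== SOURCE B (Python) =====
-- LONG_SEC = 4
--
-- def ejeOblicuoDe(dna):
--     # one bucketing pass: diag[d] = the whole anti-diagonal r+c == d (rows increasing),
--     # columns truncated to the matrix width; then a simple emit loop.
--     n = len(dna)
--     diag = {}
--     for r, row in enumerate(dna):
--         for c in range(min(len(row), n)):
--             d = r + c
--             diag[d] = diag.get(d, "") + row[c]
--     last = n - 1
--     out = []
--     for j in range(LONG_SEC - 1, n):
--         out.append(diag.get(j, ""))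
--         out.append(",")
--         if j != last:
--             out.append(diag.get(2 * last - j, ""))
--         out.append(",")
--     return "".join(out)
-- ===== Notes on version B (the rewrite author's own statement) =====
-- stated objective: alternative
-- what changed: B makes one bucketing pass over the cells, collecting each anti-diagonal (key r+c) into a dict, and then a flat emit loop reads the diagonal and its mirror straight out of the table, instead of A's nested index loops that re-walk the matrix to rebuild each diagonal and its mirror character by character.
import Mathlib
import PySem

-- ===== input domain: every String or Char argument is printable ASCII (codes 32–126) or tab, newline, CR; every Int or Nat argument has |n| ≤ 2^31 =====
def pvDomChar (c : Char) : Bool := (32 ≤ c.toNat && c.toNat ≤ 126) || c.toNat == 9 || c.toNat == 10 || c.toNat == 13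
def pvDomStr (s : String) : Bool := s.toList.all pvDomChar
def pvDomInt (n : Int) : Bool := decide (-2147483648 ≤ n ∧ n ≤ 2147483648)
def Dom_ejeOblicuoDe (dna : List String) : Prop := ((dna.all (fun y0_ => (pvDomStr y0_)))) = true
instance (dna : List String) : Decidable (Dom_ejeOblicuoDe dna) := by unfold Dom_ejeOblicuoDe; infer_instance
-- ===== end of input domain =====

-- B replaces A's nested index loops by one bucketing pass into a dict keyed by the
-- anti-diagonal index r+c followed by a flat emit loop (alternative decomposition,
-- same cost); equivalence is about the return value, neither version mutates its input.

-- ===== PORT A =====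
-- dna[i][c] as a 0/1-char chunk: `none` would be Python's IndexError, excluded by Pre_.
def pvCellS (row : String) (c : Int) : List Char :=
  match PySem.Str.pyGet? row c with
  | some ch => [ch]
  | none => []

def pvCell (dna : List String) (r c : Int) : List Char :=
  match PySem.List.pyGet? dna r with
  | some row => pvCellS row c
  | none => []

def ejeOblicuoDe (dna : List String) : String :=
  let lenDna : Int := PySem.List.len dna - 1
  String.mk ((PySem.List.pyRange 3 (PySem.List.len dna) 1).foldl (fun acc j =>
    let ab := (PySem.List.pyRange 0 (j + 1) 1).foldl
      (fun (s : List Char × List Char) i =>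
        (s.1 ++ pvCell dna i (j - i),
         if j ≠ lenDna then s.2 ++ pvCell dna (lenDna - (j - i)) (lenDna - i) else s.2))
      ([], [])
    acc ++ (ab.1 ++ [','] ++ ab.2 ++ [','])) [])

-- ===== PORT B =====
-- row[c] as a 0/1-char chunk (B only indexes columns that exist).
def pvCellB (row : String) (c : Int) : List Char :=
  match PySem.Str.pyGet? row c with
  | some ch => [ch]
  | none => []

def ejeOblicuoDe_alt (dna : List String) : String :=
  let n : Int := PySem.List.len dna
  let diag : PySem.Dict Int (List Char) :=
    (PySem.List.enumerate dna 0).foldl (fun dd rw =>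
      (PySem.List.pyRange 0 (min (PySem.Str.len rw.2) n) 1).foldl
        (fun dd c => dd.insert (rw.1 + c) (dd.getD (rw.1 + c) [] ++ pvCellB rw.2 c)) dd)
      PySem.Dict.empty
  let lastI : Int := n - 1
  let out : List (List Char) :=
    (PySem.List.pyRange 3 n 1).foldl (fun out j =>
      let out1 := out ++ [diag.getD j []] ++ [[',']]
      let out2 := if j ≠ lastI then out1 ++ [diag.getD (2 * lastI - j) []] else out1
      out2 ++ [[',']]) []
  String.mk out.flatten

-- ===== PRECONDITION & SPEC =====
-- Exactly the inputs on which the Python A returns (elsewhere it raises IndexError):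
-- with n = len(dna) ≥ 4, row r is indexed up to column max(n-1-r, min(n,2n-4-r)-1),
-- so each row must be at least that long; for n < 4 A touches nothing.
def Pre_ejeOblicuoDe (dna : List String) : Prop :=
  dna.length < 4 ∨ ∀ r : Nat, r < dna.length →
    max ((dna.length : Int) - r) (min (dna.length : Int) (2 * (dna.length : Int) - 4 - r))
      ≤ PySem.Str.len (dna.getD r "")
instance (dna : List String) : Decidable (Pre_ejeOblicuoDe dna) := by
  unfold Pre_ejeOblicuoDe; infer_instance

def pvWitness_ejeOblicuoDe : List String := ["ACGT", "CAGT", "TTAT", "AGAC"]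

def Spec_ejeOblicuoDe (dna : List String) (out : String) : Prop := out = ejeOblicuoDe_alt dna
instance (dna : List String) (out : String) : Decidable (Spec_ejeOblicuoDe dna out) := by unfold Spec_ejeOblicuoDe; infer_instance

-- ===== CLAIM (what is proved, stated in full; the proofs are below) =====
def Claim_equal_ejeOblicuoDe : Prop := ∀ (dna : List String), Dom_ejeOblicuoDe dna → Pre_ejeOblicuoDe dna → Spec_ejeOblicuoDe dna (ejeOblicuoDe dna)

-- ===== LEMMAS AND PROOFS =====

-- the characters of anti-diagonal d (rows in increasing order, columns < len dna)
def pvDiagSpec (dna : List String) (d : Int) : List Char :=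
  (PySem.List.pyRange 0 (PySem.List.len dna) 1).flatMap
    (fun r => if 0 ≤ d - r ∧ d - r < PySem.List.len dna then pvCell dna r (d - r) else [])

def pvEmit (dna : List String) (j : Int) : List Char :=
  pvDiagSpec dna j ++ [','] ++
    (if j ≠ PySem.List.len dna - 1 then pvDiagSpec dna (2 * (PySem.List.len dna - 1) - j) else []) ++ [',']

theorem pv_flatMap_congr {α β : Type} (l : List α) (f g : α → List β)
    (h : ∀ x ∈ l, f x = g x) : l.flatMap f = l.flatMap g := by
  induction l with
  | nil => rfl
  | cons a t ih =>
    simp only [List.flatMap_cons]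
    rw [h a (by simp), ih (fun x hx => h x (by simp [hx]))]

theorem pv_foldl_flatMap {α β γ : Type} (l : List α) (g : α → List β)
    (f : γ → β → γ) (init : γ) :
    (l.flatMap g).foldl f init = l.foldl (fun a x => (g x).foldl f a) init := by
  induction l generalizing init with
  | nil => rfl
  | cons a t ih => simp only [List.flatMap_cons, List.foldl_append, List.foldl_cons, ih]

theorem pv_flatten_flatMap {α β : Type} (l : List α) (g : α → List (List β)) :
    (l.flatMap g).flatten = l.flatMap (fun x => (g x).flatten) := by
  induction l with
  | nil => rfl
  | cons a t ih => simp [List.flatMap_cons, ih]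

theorem pv_range_filter_eq (M : Nat) (t : Int) :
    (List.range M).filter (fun (k : Nat) => decide ((k : Int) = t)) =
      if 0 ≤ t ∧ t < (M : Int) then [t.toNat] else [] := by
  induction M with
  | zero =>
    have h : ¬ (0 ≤ t ∧ t < ((0 : Nat) : Int)) := by omega
    simp [h]
  | succ m ih =>
    rw [List.range_succ, List.filter_append, ih]
    by_cases hm : (m : Int) = t
    · have h1 : ¬ (0 ≤ t ∧ t < (m : Int)) := by omega
      have h2 : 0 ≤ t ∧ t < ((m + 1 : Nat) : Int) := by omega
      simp [h1, h2, hm]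
      omega
    · by_cases h1 : 0 ≤ t ∧ t < (m : Int)
      · have h2 : 0 ≤ t ∧ t < ((m + 1 : Nat) : Int) := by omega
        simp [h1, h2, hm]
        omega
      · have h2 : ¬ (0 ≤ t ∧ t < ((m + 1 : Nat) : Int)) := by omega
        simp [h1, h2, hm]
        omega

theorem pv_getD_foldl_insert_append (l : List (Int × List Char))
    (d0 : PySem.Dict Int (List Char)) (k : Int) :
    (l.foldl (fun dd p => dd.insert p.1 (dd.getD p.1 [] ++ p.2)) d0).getD k []
      = d0.getD k [] ++ (l.filter (fun p => p.1 == k)).flatMap (·.2) := by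
  induction l generalizing d0 with
  | nil => simp
  | cons p t ih =>
    simp only [List.foldl_cons, ih, List.filter_cons]
    by_cases h : p.1 = k
    · simp [PySem.Dict.getD_insert, h]
    · simp [PySem.Dict.getD_insert, h, Ne.symm h]


theorem pv_cellB_eq : pvCellB = pvCellS := rfl

def pvPairs (dna : List String) : List (Int × List Char) :=
  (PySem.List.pyRange 0 (PySem.List.len dna) 1).flatMap
    (fun r => (PySem.List.pyRange 0 (min (PySem.Str.len (PySem.List.pyGetD dna r "")) (PySem.List.len dna)) 1).map
      (fun c => (r + c, pvCellS (PySem.List.pyGetD dna r "") c)))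

theorem pv_filter_flatMap_flatMap {α β γ : Type} (l : List α) (g : α → List β)
    (p : β → Bool) (h : β → List γ) :
    ((l.flatMap g).filter p).flatMap h = l.flatMap (fun x => ((g x).filter p).flatMap h) := by
  induction l with
  | nil => rfl
  | cons a t ih => simp [List.flatMap_cons, List.filter_append, ih]

theorem pv_row_filter (row : String) (n r d : Int) (hn : 0 ≤ n) :
    (((PySem.List.pyRange 0 (min (PySem.Str.len row) n) 1).map
        (fun c => (r + c, pvCellS row c))).filter (fun p => p.1 == d)).flatMap (fun p => p.2)
      = if 0 ≤ d - r ∧ d - r < min (PySem.Str.len row) n then pvCellS row (d - r) else [] := by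
  simp only [PySem.Str.len_eq]
  rw [List.filter_map, List.flatMap_map, PySem.List.pyRange_one]
  rw [List.filter_map, List.flatMap_map]
  rw [List.filter_congr (q := fun (k : Nat) => decide ((k : Int) = d - r)) (by
    intro k _
    simp only [Function.comp_apply]
    rw [Bool.eq_iff_iff]
    simp only [beq_iff_eq, decide_eq_true_eq]
    omega)]
  rw [pv_range_filter_eq]
  by_cases hc : 0 ≤ d - r ∧ d - r < min ((row.toList.length : Int)) n
  · have h1 : 0 ≤ d - r ∧ d - r < (((min ((row.toList.length : Int)) n - 0).toNat : Nat) : Int) := by omega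
    have ht : ((d - r).toNat : Int) = d - r := by omega
    rw [if_pos h1, if_pos hc]
    simp [Function.comp_apply, ht]
  · have h1 : ¬ (0 ≤ d - r ∧ d - r < (((min ((row.toList.length : Int)) n - 0).toNat : Nat) : Int)) := by omega
    rw [if_neg h1, if_neg hc]
    simp

theorem pv_cellS_eq_nil (row : String) (t : Int) (h : (row.toList.length : Int) ≤ t) :
    pvCellS row t = [] := by
  have hl : row.toList.length = row.length := String.length_toList
  have hnone : PySem.Str.pyGet? row t = none := by
    simp [PySem.List.pyGet?_eq_none_iff, PySem.Raise.InRange]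
    omega
  rw [pvCellS, hnone]

theorem pv_pairs_filter (dna : List String) (d : Int) :
    ((pvPairs dna).filter (fun p => p.1 == d)).flatMap (fun p => p.2) = pvDiagSpec dna d := by
  rw [pvPairs, pvDiagSpec, pv_filter_flatMap_flatMap]
  apply pv_flatMap_congr
  intro r hr
  rw [PySem.List.mem_pyRange_one] at hr
  simp only [PySem.List.len_eq] at hr ⊢
  have hr2 : r < ((dna.length : Nat) : Int) := hr.2
  rw [pv_row_filter _ _ _ _ (by positivity)]
  have hget : PySem.List.pyGet? dna r = some (PySem.List.pyGetD dna r "") := by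
    rw [PySem.List.pyGet?_eq_some_getElem dna hr.1 hr2, PySem.List.pyGetD_eq_getElem dna "" hr.1 hr2]
  have hcell : ∀ c : Int, pvCell dna r c = pvCellS (PySem.List.pyGetD dna r "") c := by
    intro c; rw [pvCell, hget]
  simp only [PySem.Str.len_eq]
  by_cases h2 : 0 ≤ d - r ∧ d - r < ((dna.length : Nat) : Int)
  · by_cases h3 : d - r < (((PySem.List.pyGetD dna r "").toList.length : Nat) : Int)
    · rw [if_pos ⟨h2.1, lt_min h3 h2.2⟩, if_pos h2, hcell]
    · rw [if_neg (by push_neg at h3 ⊢; intro _; omega), if_pos h2, hcell,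
          pv_cellS_eq_nil _ _ (by omega)]
  · rw [if_neg (by push_neg at h2 ⊢; intro h0; have := h2 h0; omega), if_neg h2]

theorem pv_diag_getD (dna : List String) (d : Int) :
    ((PySem.List.enumerate dna 0).foldl (fun dd rw =>
        (PySem.List.pyRange 0 (min (PySem.Str.len rw.2) (PySem.List.len dna)) 1).foldl
          (fun dd c => dd.insert (rw.1 + c) (dd.getD (rw.1 + c) [] ++ pvCellB rw.2 c)) dd)
      (PySem.Dict.empty : PySem.Dict Int (List Char))).getD d [] = pvDiagSpec dna d := by
  rw [pv_cellB_eq]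
  have hb : (PySem.List.enumerate dna 0).foldl (fun dd rw =>
        (PySem.List.pyRange 0 (min (PySem.Str.len rw.2) (PySem.List.len dna)) 1).foldl
          (fun dd c => dd.insert (rw.1 + c) (dd.getD (rw.1 + c) [] ++ pvCellS rw.2 c)) dd)
      (PySem.Dict.empty : PySem.Dict Int (List Char))
      = (pvPairs dna).foldl (fun dd p => dd.insert p.1 (dd.getD p.1 [] ++ p.2)) PySem.Dict.empty := by
    rw [pvPairs, pv_foldl_flatMap, PySem.List.enumerate_eq_map_pyRange (d := ""), List.foldl_map]
    simp only [List.foldl_map]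
  rw [hb, pv_getD_foldl_insert_append]
  simpa using pv_pairs_filter dna d

theorem pv_alt_eq (dna : List String) :
    ejeOblicuoDe_alt dna
      = String.mk ((PySem.List.pyRange 3 (PySem.List.len dna) 1).flatMap (pvEmit dna)) := by
  rw [ejeOblicuoDe_alt]
  dsimp only
  simp only [pv_diag_getD]
  congr 1
  have hco := PySem.List.foldl_congr_mem (PySem.List.pyRange 3 (PySem.List.len dna))
    (fun out j =>
      (if j ≠ PySem.List.len dna - 1 then
          out ++ [pvDiagSpec dna j] ++ [[',']] ++ [pvDiagSpec dna (2 * (PySem.List.len dna - 1) - j)]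
        else out ++ [pvDiagSpec dna j] ++ [[',']]) ++ [[',']])
    (fun out j => out ++ ([pvDiagSpec dna j] ++ [[',']] ++
      (if j ≠ PySem.List.len dna - 1 then [pvDiagSpec dna (2 * (PySem.List.len dna - 1) - j)] else [])
      ++ [[',']]))
    []
    (by intro acc j _
        by_cases h : j = ((dna.length : Nat) : Int) - 1 <;>
          simp [PySem.List.len_eq, h])
  rw [hco, PySem.List.foldl_append_eq_flatMap, List.nil_append, pv_flatten_flatMap]
  apply pv_flatMap_congr
  intro j _
  by_cases h : j = ((dna.length : Nat) : Int) - 1 <;>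
    simp [pvEmit, PySem.List.len_eq, h]

theorem pv_sA_eq (dna : List String) (j : Int) (h0 : 0 ≤ j) (hn : j < PySem.List.len dna) :
    (PySem.List.pyRange 0 (j + 1) 1).flatMap (fun i => pvCell dna i (j - i)) = pvDiagSpec dna j := by
  rw [pvDiagSpec,
      PySem.List.pyRange_one_append 0 (j + 1) (PySem.List.len dna) (by omega) (by omega),
      List.flatMap_append]
  have h2 : (PySem.List.pyRange (j + 1) (PySem.List.len dna) 1).flatMap
      (fun r => if 0 ≤ j - r ∧ j - r < PySem.List.len dna then pvCell dna r (j - r) else []) = [] := by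
    rw [List.flatMap_eq_nil_iff]
    intro r hrm
    rw [PySem.List.mem_pyRange_one] at hrm
    rw [if_neg (by omega)]
  rw [h2, List.append_nil]
  apply pv_flatMap_congr
  intro r hrm
  rw [PySem.List.mem_pyRange_one] at hrm
  rw [if_pos ⟨by omega, by omega⟩]

theorem pv_sB_eq (dna : List String) (j : Int) (h0 : 0 ≤ j) (hn : j < PySem.List.len dna - 1) :
    (PySem.List.pyRange 0 (j + 1) 1).flatMap
        (fun i => pvCell dna (PySem.List.len dna - 1 - (j - i)) (PySem.List.len dna - 1 - i))
      = pvDiagSpec dna (2 * (PySem.List.len dna - 1) - j) := by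
  rw [pvDiagSpec,
      PySem.List.pyRange_one_append 0 (PySem.List.len dna - 1 - j) (PySem.List.len dna)
        (by omega) (by omega),
      List.flatMap_append]
  have h2 : (PySem.List.pyRange 0 (PySem.List.len dna - 1 - j) 1).flatMap
      (fun r => if 0 ≤ 2 * (PySem.List.len dna - 1) - j - r ∧
          2 * (PySem.List.len dna - 1) - j - r < PySem.List.len dna then
        pvCell dna r (2 * (PySem.List.len dna - 1) - j - r) else []) = [] := by
    rw [List.flatMap_eq_nil_iff]
    intro r hrm
    rw [PySem.List.mem_pyRange_one] at hrm
    rw [if_neg (by omega)]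
  rw [h2, List.nil_append]
  rw [PySem.List.pyRange_one, PySem.List.pyRange_one]
  have hM : (PySem.List.len dna - (PySem.List.len dna - 1 - j)).toNat = (j + 1 - 0).toNat := by
    omega
  rw [hM, List.flatMap_map, List.flatMap_map]
  apply pv_flatMap_congr
  intro k hk
  rw [List.mem_range] at hk
  have hkj : (k : Int) ≤ j := by omega
  rw [if_pos ⟨by omega, by omega⟩]
  have e1 : PySem.List.len dna - 1 - (j - (0 + (k : Int))) = PySem.List.len dna - 1 - j + (k : Int) := by
    omega
  have e2 : 2 * (PySem.List.len dna - 1) - j - (PySem.List.len dna - 1 - j + (k : Int))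
      = PySem.List.len dna - 1 - (0 + (k : Int)) := by omega
  rw [e1, e2]

theorem pv_a_eq (dna : List String) :
    ejeOblicuoDe dna
      = String.mk ((PySem.List.pyRange 3 (PySem.List.len dna) 1).flatMap (pvEmit dna)) := by
  rw [ejeOblicuoDe]
  dsimp only
  congr 1
  have hbody : ∀ (acc : List Char), ∀ j ∈ PySem.List.pyRange 3 (PySem.List.len dna),
      (fun (acc : List Char) (j : Int) =>
        acc ++
          (((PySem.List.pyRange 0 (j + 1) 1).foldl
            (fun (s : List Char × List Char) i =>
              (s.1 ++ pvCell dna i (j - i),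
               if j ≠ PySem.List.len dna - 1 then
                 s.2 ++ pvCell dna (PySem.List.len dna - 1 - (j - i)) (PySem.List.len dna - 1 - i)
               else s.2))
            ([], [])).1 ++ [','] ++
           ((PySem.List.pyRange 0 (j + 1) 1).foldl
            (fun (s : List Char × List Char) i =>
              (s.1 ++ pvCell dna i (j - i),
               if j ≠ PySem.List.len dna - 1 then
                 s.2 ++ pvCell dna (PySem.List.len dna - 1 - (j - i)) (PySem.List.len dna - 1 - i)
               else s.2))
            ([], [])).2 ++ [','])) acc j
        = acc ++ pvEmit dna j := by
    intro acc j hj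
    rw [PySem.List.mem_pyRange_one] at hj
    dsimp only
    rw [PySem.List.foldl_prod_mk (f := fun (a : List Char) (i : Int) => a ++ pvCell dna i (j - i))
        (g := fun (a : List Char) (i : Int) =>
          if j ≠ PySem.List.len dna - 1 then
            a ++ pvCell dna (PySem.List.len dna - 1 - (j - i)) (PySem.List.len dna - 1 - i)
          else a)]
    by_cases he : j = PySem.List.len dna - 1
    · have hg : (fun (a : List Char) (i : Int) =>
          if j ≠ PySem.List.len dna - 1 then
            a ++ pvCell dna (PySem.List.len dna - 1 - (j - i)) (PySem.List.len dna - 1 - i)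
          else a) = fun a _ => a := by
        funext a i
        rw [if_neg (by simp [he])]
      rw [hg, PySem.List.foldl_ignore,
          PySem.List.foldl_append_eq_flatMap, pv_sA_eq dna j (by omega) (by omega),
          pvEmit, if_neg (by simp [he])]
      simp
    · have hg : (fun (a : List Char) (i : Int) =>
          if j ≠ PySem.List.len dna - 1 then
            a ++ pvCell dna (PySem.List.len dna - 1 - (j - i)) (PySem.List.len dna - 1 - i)
          else a) = fun a i =>
            a ++ pvCell dna (PySem.List.len dna - 1 - (j - i)) (PySem.List.len dna - 1 - i) := by
        funext a i
        rw [if_pos (by simpa using he)]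
      rw [hg, PySem.List.foldl_append_eq_flatMap,
          PySem.List.foldl_append_eq_flatMap, pv_sA_eq dna j (by omega) (by omega),
          pv_sB_eq dna j (by omega) (by omega),
          pvEmit, if_pos (by simpa using he)]
      simp
  rw [PySem.List.foldl_congr_mem _ _ _ _ hbody, PySem.List.foldl_append_eq_flatMap, List.nil_append]

-- ===== VERDICT (by name: the statement is the Claim_ definition above) =====
theorem ejeOblicuoDe_spec : Claim_equal_ejeOblicuoDe := by
  intro dna _ _
  unfold Spec_ejeOblicuoDe
  rw [pv_a_eq, pv_alt_eq]
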